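-- pv_equiv track=rewrite | github.com/lukepoley/Sales-Tax-Automation | python/NNOG Sales Tax Refund.py | get_quarter_info
-- ===== SOURCE A (Python) =====
-- def get_quarter_info(month, year, offset=0):
--     """Returns (Quarter String, Year) based on month and a quarter offset."""
--     current_q = (month - 1) // 3 + 1
--     target_q = current_q + offset
--     target_year = year
--     while target_q > 4:
--         target_q -= 4
--         target_year += 1
--     while target_q < 1:
--         target_q += 4
--         target_year -= 1
--     return f"Q{target_q}", target_year
-- ===== SOURCE B (Python) =====
-- def get_quarter_info(month, year, offset=0):
--     """Returns (Quarter String, Year) based on month and a quarter offset."""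
--     years_delta, rem = divmod((month - 1) // 3 + offset, 4)
--     return f"Q{rem + 1}", year + years_delta
-- ===== Notes on version B (the rewrite author's own statement) =====
-- stated objective: faster
-- what changed: Replaced the two wrap-around while-loops (O(|offset|) iterations) by a single divmod: the 0-indexed quarter count floor-divided by 4 gives the year delta and the quarter remainder in one step.
import Mathlib
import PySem

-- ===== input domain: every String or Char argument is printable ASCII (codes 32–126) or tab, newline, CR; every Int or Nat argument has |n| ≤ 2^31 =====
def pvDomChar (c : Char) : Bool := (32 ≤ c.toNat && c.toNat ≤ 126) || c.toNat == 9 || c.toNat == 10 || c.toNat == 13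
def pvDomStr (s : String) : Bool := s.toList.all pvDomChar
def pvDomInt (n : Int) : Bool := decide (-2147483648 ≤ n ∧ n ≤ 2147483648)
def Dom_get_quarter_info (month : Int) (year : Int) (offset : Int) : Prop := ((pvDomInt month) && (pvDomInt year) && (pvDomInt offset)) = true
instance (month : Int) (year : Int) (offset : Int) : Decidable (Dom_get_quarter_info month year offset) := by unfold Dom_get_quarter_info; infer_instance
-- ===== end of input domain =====

-- B replaces A's two wrap-around while-loops by a single divmod; objective: simpler.

-- ===== PORT A =====
-- `while target_q > 4: target_q -= 4; target_year += 1`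
def pvLoopDown (q y : Int) : Int × Int :=
  if q > 4 then pvLoopDown (q - 4) (y + 1) else (q, y)
termination_by (q - 4).toNat
decreasing_by omega

-- `while target_q < 1: target_q += 4; target_year -= 1`
def pvLoopUp (q y : Int) : Int × Int :=
  if q < 1 then pvLoopUp (q + 4) (y - 1) else (q, y)
termination_by (1 - q).toNat
decreasing_by omega

def get_quarter_info (month : Int) (year : Int) (offset : Int) : String × Int :=
  let current_q := PySem.Int.floordiv (month - 1) 3 + 1
  let target_q := current_q + offset
  let target_year := year
  let p := pvLoopDown target_q target_year
  let p2 := pvLoopUp p.1 p.2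
  ("Q" ++ PySem.Int.toStr p2.1, p2.2)

-- ===== PORT B =====
def get_quarter_info_alt (month : Int) (year : Int) (offset : Int) : String × Int :=
  let dm := PySem.Int.divmod? (PySem.Int.floordiv (month - 1) 3 + offset) 4
  match dm with
  | some (years_delta, rem) => ("Q" ++ PySem.Int.toStr (rem + 1), year + years_delta)
  | none => ("", 0)  -- unreachable: divisor is the literal 4

-- ===== PRECONDITION & SPEC =====
def Spec_get_quarter_info (month : Int) (year : Int) (offset : Int) (out : String × Int) : Prop := out = get_quarter_info_alt month year offset
instance (month : Int) (year : Int) (offset : Int) (out : String × Int) : Decidable (Spec_get_quarter_info month year offset out) := by unfold Spec_get_quarter_info; infer_instance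

-- ===== CLAIM (what is proved, stated in full; the proofs are below) =====
def Claim_equal_get_quarter_info : Prop := ∀ (month : Int) (year : Int) (offset : Int), Dom_get_quarter_info month year offset → Spec_get_quarter_info month year offset (get_quarter_info month year offset)

-- ===== LEMMAS AND PROOFS =====

lemma pvLoopDown_eq (q y : Int) :
    pvLoopDown q y = if q > 4 then ((q - 1) % 4 + 1, y + (q - 1) / 4) else (q, y) := by
  induction q, y using pvLoopDown.induct with
  | case1 q y h ih =>
    rw [pvLoopDown, if_pos h, ih]
    split_ifs with h2 <;> simp only [if_pos h, Prod.mk.injEq] <;> constructor <;> omega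
  | case2 q y h =>
    rw [pvLoopDown, if_neg h, if_neg h]

lemma pvLoopUp_eq (q y : Int) (hq : q ≤ 4) :
    pvLoopUp q y = if q < 1 then ((q - 1) % 4 + 1, y + (q - 1) / 4) else (q, y) := by
  induction q, y using pvLoopUp.induct with
  | case1 q y h ih =>
    rw [pvLoopUp, if_pos h, ih (by omega)]
    split_ifs with h2 <;> simp only [if_pos h, Prod.mk.injEq] <;> constructor <;> omega
  | case2 q y h =>
    rw [pvLoopUp, if_neg h, if_neg h]

lemma pvNormalize (q y : Int) :
    pvLoopUp (pvLoopDown q y).1 (pvLoopDown q y).2 = ((q - 1) % 4 + 1, y + (q - 1) / 4) := by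
  rw [pvLoopDown_eq]
  by_cases h : q > 4
  · rw [if_pos h, pvLoopUp]
    have h1 : ¬ ((q - 1) % 4 + 1 < 1) := by omega
    rw [if_neg h1]
  · rw [if_neg h, pvLoopUp_eq q y (by omega)]
    split_ifs with h2
    · rfl
    · simp only [Prod.mk.injEq]; constructor <;> omega

-- ===== VERDICT (by name: the statement is the Claim_ definition above) =====
theorem get_quarter_info_spec : Claim_equal_get_quarter_info := by
  intro month year offset _
  unfold Spec_get_quarter_info get_quarter_info get_quarter_info_alt
  simp only [pvNormalize]
  have h4 : (4 : Int) ≠ 0 := by norm_num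
  simp only [PySem.Int.divmod?, if_neg h4]
  have hfm : ∀ a : Int, a.fmod 4 = a % 4 := fun a => by rw [Int.fmod_eq_emod]; simp
  have hfd : ∀ a : Int, a.fdiv 4 = a / 4 := fun a => by rw [Int.fdiv_eq_ediv]; simp
  simp only [hfm, hfd, Prod.mk.injEq]
  constructor
  · congr 2
    ring_nf
  · ring_nf
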